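-- pv_equiv track=rewrite | github.com/ouwei2013/Manga-Text-With-Deep-Learning | edge_detector/component_filter.py | one_dimension_val_clutering
-- ===== SOURCE A (Python) =====
-- def one_dimension_val_clutering(vals, max_distance=5):
--     """ One-dimension clustering on segment widths or heights
--     If a list of segments share similar widths or heights,
--     these segments will fall in the same clusters
--
--     Args:
--         vals: segment widths or heights
--         max_distance: the max distance between two neighboring values
--
--     Returns:
--         Clusters of segments share similar widths or heights
--
--     """
--     vals = sorted(vals)
--     clusters = []
--     for (idx, i) in enumerate(vals):
--         cluster = [j for j in vals if abs(j - i) < max_distance]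
--         clusters.append(cluster)
--     clusters = sorted(clusters, key=len, reverse=True)
--     cluster = clusters[0]
--     if len(cluster) / len(vals) > 0.6 or len(cluster) >= 3:
--         return cluster
--     else:
--         return []
-- ===== SOURCE B (Python) =====
-- def one_dimension_val_clutering(vals, max_distance=5):
--     """Two-pointer sliding window over the sorted values: O(n log n) instead of
--     A's O(n^2) per-element rescans (A raises IndexError on []; B returns [])."""
--     svals = sorted(vals)
--     n = len(svals)
--     lo = hi = best_lo = best_hi = 0
--     best_len = -1
--     for v in svals:
--         while lo < n and svals[lo] <= v - max_distance:
--             lo += 1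
--         while hi < n and svals[hi] < v + max_distance:
--             hi += 1
--         if hi - lo > best_len:
--             best_len, best_lo, best_hi = hi - lo, lo, hi
--     cluster = svals[best_lo:best_hi]
--     if 5 * len(cluster) > 3 * n or len(cluster) >= 3:
--         return cluster
--     return []
-- ===== Notes on version B (the rewrite author's own statement) =====
-- stated objective: faster
-- what changed: A rescans the whole sorted list for every element and then sorts all n clusters by length; B sweeps the sorted list once with two monotone pointers (lo/hi) keeping the first maximal window, so no cluster lists are built and no second sort happens.
import Mathlib
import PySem

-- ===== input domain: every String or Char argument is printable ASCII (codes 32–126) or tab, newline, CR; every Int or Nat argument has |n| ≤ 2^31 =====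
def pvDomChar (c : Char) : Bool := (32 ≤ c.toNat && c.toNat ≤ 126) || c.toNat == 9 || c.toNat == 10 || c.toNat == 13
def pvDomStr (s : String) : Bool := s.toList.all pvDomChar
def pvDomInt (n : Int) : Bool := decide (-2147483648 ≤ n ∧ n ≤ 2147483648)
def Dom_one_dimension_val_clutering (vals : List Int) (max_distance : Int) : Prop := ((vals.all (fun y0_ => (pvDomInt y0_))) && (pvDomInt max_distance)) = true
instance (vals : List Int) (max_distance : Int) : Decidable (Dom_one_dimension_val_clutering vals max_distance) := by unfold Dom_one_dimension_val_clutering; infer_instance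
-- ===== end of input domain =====

-- B replaces A's per-element rescan of the whole list by a two-pointer sliding
-- window over the sorted values; same return value wherever A returns.

-- ===== PORT A =====
-- Note on 'len(cluster) / len(vals) > 0.6': a float test; it only decides the result
-- when len(cluster) ≤ 2 (else the 'or' is already true), where it is exact as '5*a > 3*n'.
def one_dimension_val_clutering (vals : List Int) (max_distance : Int) : List Int :=
  let sv := PySem.List.sorted vals (fun x => x) false
  let clusters := (PySem.List.enumerate sv 0).foldl
    (fun acc p => acc ++ [sv.filter (fun j => decide (|j - p.2| < max_distance))]) []
  let clusters2 := PySem.List.sorted clusters (fun c => c.length) true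
  -- clusters[0]: IndexError on vals = [] — excluded by Pre_
  let cluster := (PySem.List.pyGet? clusters2 0).getD []
  if 5 * (cluster.length : Int) > 3 * (sv.length : Int) ∨ 3 ≤ cluster.length then cluster else []

-- ===== PORT B =====
-- 'while lo < n and svals[lo] <= bound: lo += 1'
def pvAdvLo (sv : List Int) (bound : Int) (i : Nat) : Nat :=
  if h : i < sv.length then
    if sv[i] ≤ bound then pvAdvLo sv bound (i + 1) else i
  else i
termination_by sv.length - i

-- 'while hi < n and svals[hi] < bound: hi += 1'
def pvAdvHi (sv : List Int) (bound : Int) (i : Nat) : Nat :=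
  if h : i < sv.length then
    if sv[i] < bound then pvAdvHi sv bound (i + 1) else i
  else i
termination_by sv.length - i

-- loop body; state s = (lo, hi, best_lo, best_hi, best_len)
def pvStepB (sv : List Int) (max_distance : Int) (s : Nat × Nat × Nat × Nat × Int) (v : Int) :
    Nat × Nat × Nat × Nat × Int :=
  let lo := pvAdvLo sv (v - max_distance) s.1
  let hi := pvAdvHi sv (v + max_distance) s.2.1
  if (hi : Int) - (lo : Int) > s.2.2.2.2 then (lo, hi, lo, hi, (hi : Int) - (lo : Int))
  else (lo, hi, s.2.2.1, s.2.2.2.1, s.2.2.2.2)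

def one_dimension_val_clutering_alt (vals : List Int) (max_distance : Int) : List Int :=
  let sv := PySem.List.sorted vals (fun x => x) false
  let n := sv.length
  let st := sv.foldl (pvStepB sv max_distance) (0, 0, 0, 0, -1)
  let cluster := PySem.List.slice sv (some (st.2.2.1 : Int)) (some (st.2.2.2.1 : Int))
  if 5 * (cluster.length : Int) > 3 * (n : Int) ∨ 3 ≤ cluster.length then cluster else []

-- ===== PRECONDITION & SPEC =====
-- Pre_ excludes only the empty list, on which A raises IndexError (clusters[0]).
def Pre_one_dimension_val_clutering (vals : List Int) (max_distance : Int) : Prop := vals ≠ []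
instance (vals : List Int) (max_distance : Int) : Decidable (Pre_one_dimension_val_clutering vals max_distance) := by unfold Pre_one_dimension_val_clutering; infer_instance

def pvWitness_one_dimension_val_clutering : List Int × Int := ([3, 1, 2], 5)

def Spec_one_dimension_val_clutering (vals : List Int) (max_distance : Int) (out : List Int) : Prop := out = one_dimension_val_clutering_alt vals max_distance
instance (vals : List Int) (max_distance : Int) (out : List Int) : Decidable (Spec_one_dimension_val_clutering vals max_distance out) := by unfold Spec_one_dimension_val_clutering; infer_instance

-- ===== CLAIM (what is proved, stated in full; the proofs are below) =====
def Claim_equal_one_dimension_val_clutering : Prop := ∀ (vals : List Int) (max_distance : Int), Dom_one_dimension_val_clutering vals max_distance → Pre_one_dimension_val_clutering vals max_distance → Spec_one_dimension_val_clutering vals max_distance (one_dimension_val_clutering vals max_distance)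

-- ===== LEMMAS AND PROOFS =====

-- A's cluster of centre v, and the window bounds B's pointers reach for centre v
def pvW (sv : List Int) (md v : Int) : List Int := sv.filter (fun j => decide (|j - v| < md))
def pvL (sv : List Int) (md v : Int) : Nat := PySem.List.bisectRight sv (v - md)
def pvH (sv : List Int) (md v : Int) : Nat := PySem.List.bisectLeft sv (v + md)
def pvWlen (sv : List Int) (md v : Int) : Int := (pvH sv md v : Int) - (pvL sv md v : Int)
-- the best-window update, abstracted from pvStepB
def pvAbsStep (sv : List Int) (md : Int) (t : Nat × Nat × Int) (x : Int) : Nat × Nat × Int :=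
  if t.2.2 < pvWlen sv md x then (pvL sv md x, pvH sv md x, pvWlen sv md x) else t
-- A's running first-max of cluster length
def pvAStep (sv : List Int) (md : Int) (m x : Int) : Int :=
  if (pvW sv md m).length < (pvW sv md x).length then x else m

theorem bisectRight_mono (sv : List Int) (hs : sv.Pairwise (· ≤ ·)) {a b : Int} (h : a ≤ b) :
    PySem.List.bisectRight sv a ≤ PySem.List.bisectRight sv b := by
  obtain ⟨hA1, hA2, hA3⟩ := PySem.List.bisectRight_spec sv a hs
  obtain ⟨hB1, hB2, hB3⟩ := PySem.List.bisectRight_spec sv b hs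
  by_contra hlt
  push_neg at hlt
  have hj : PySem.List.bisectRight sv b < sv.length := lt_of_lt_of_le hlt hA1
  have h1 := hA2 _ hj hlt
  have h2 := hB3 _ hj le_rfl
  omega

theorem bisectLeft_mono (sv : List Int) (hs : sv.Pairwise (· ≤ ·)) {a b : Int} (h : a ≤ b) :
    PySem.List.bisectLeft sv a ≤ PySem.List.bisectLeft sv b := by
  obtain ⟨hA1, hA2, hA3⟩ := PySem.List.bisectLeft_spec sv a hs
  obtain ⟨hB1, hB2, hB3⟩ := PySem.List.bisectLeft_spec sv b hs
  by_contra hlt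
  push_neg at hlt
  have hj : PySem.List.bisectLeft sv b < sv.length := lt_of_lt_of_le hlt hA1
  have h1 := hA2 _ hj hlt
  have h2 := hB3 _ hj le_rfl
  omega

theorem bisectLeft_le_bisectRight (sv : List Int) (hs : sv.Pairwise (· ≤ ·)) {a b : Int} (h : a ≤ b) :
    PySem.List.bisectLeft sv a ≤ PySem.List.bisectRight sv b := by
  obtain ⟨hA1, hA2, hA3⟩ := PySem.List.bisectLeft_spec sv a hs
  obtain ⟨hB1, hB2, hB3⟩ := PySem.List.bisectRight_spec sv b hs
  by_contra hlt
  push_neg at hlt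
  have hj : PySem.List.bisectRight sv b < sv.length := lt_of_lt_of_le hlt hA1
  have h1 := hA2 _ hj hlt
  have h2 := hB3 _ hj le_rfl
  omega

theorem bisectRight_le_bisectLeft (sv : List Int) (hs : sv.Pairwise (· ≤ ·)) {a b : Int} (h : a < b) :
    PySem.List.bisectRight sv a ≤ PySem.List.bisectLeft sv b := by
  obtain ⟨hA1, hA2, hA3⟩ := PySem.List.bisectRight_spec sv a hs
  obtain ⟨hB1, hB2, hB3⟩ := PySem.List.bisectLeft_spec sv b hs
  by_contra hlt
  push_neg at hlt
  have hj : PySem.List.bisectLeft sv b < sv.length := lt_of_lt_of_le hlt hA1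
  have h1 := hA2 _ hj hlt
  have h2 := hB3 _ hj le_rfl
  omega

theorem pvAdvLo_eq (sv : List Int) (b : Int)
    (hs : sv.Pairwise (· ≤ ·)) (i : Nat) (hle : i ≤ PySem.List.bisectRight sv b) :
    pvAdvLo sv b i = PySem.List.bisectRight sv b := by
  obtain ⟨h1, h2, h3⟩ := PySem.List.bisectRight_spec sv b hs
  induction i using pvAdvLo.induct sv b with
  | case1 i hlt hle2 ih =>
    rw [pvAdvLo]
    simp only [hlt, dif_pos, hle2, if_pos]
    apply ih
    by_contra hgt
    push_neg at hgt
    have := h3 _ hlt (by omega)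
    omega
  | case2 i hlt hgt =>
    rw [pvAdvLo]
    simp [hlt, hgt]
    have : ¬ i < PySem.List.bisectRight sv b := fun hc => by have := h2 _ hlt hc; omega
    omega
  | case3 i hge =>
    rw [pvAdvLo]
    simp [hge]
    omega

theorem pvAdvHi_eq (sv : List Int) (b : Int)
    (hs : sv.Pairwise (· ≤ ·)) (i : Nat) (hle : i ≤ PySem.List.bisectLeft sv b) :
    pvAdvHi sv b i = PySem.List.bisectLeft sv b := by
  obtain ⟨h1, h2, h3⟩ := PySem.List.bisectLeft_spec sv b hs
  induction i using pvAdvHi.induct sv b with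
  | case1 i hlt hle2 ih =>
    rw [pvAdvHi]
    simp only [hlt, dif_pos, hle2, if_pos]
    apply ih
    by_contra hgt
    push_neg at hgt
    have := h3 _ hlt (by omega)
    omega
  | case2 i hlt hgt =>
    rw [pvAdvHi]
    simp [hlt, hgt]
    have : ¬ i < PySem.List.bisectLeft sv b := fun hc => by have := h2 _ hlt hc; omega
    omega
  | case3 i hge =>
    rw [pvAdvHi]
    simp [hge]
    omega

-- a filter whose predicate holds exactly on the index interval [L, H) is a drop/take segment
theorem filter_eq_drop_take (xs : List Int) (p : Int → Bool) :
    ∀ (L H : Nat), H ≤ xs.length →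
    (∀ (k : Nat) (hk : k < xs.length), p xs[k] = true ↔ (L ≤ k ∧ k < H)) →
    xs.filter p = (xs.drop L).take (H - L) := by
  induction xs with
  | nil => intro L H _ _; simp
  | cons x xs ih =>
    intro L H hH hch
    match L, H with
    | L, 0 =>
      have hnil : (x :: xs).filter p = [] := by
        rw [List.filter_eq_nil_iff]
        intro a ha
        obtain ⟨k, hk, rfl⟩ := List.getElem_of_mem ha
        have := hch k hk
        simp only [this]
        omega
      simp [hnil]
    | 0, H + 1 =>
      have hx : p x = true := (hch 0 (by simp)).mpr (by omega)
      have hch' : ∀ (k : Nat) (hk : k < xs.length), p xs[k] = true ↔ (0 ≤ k ∧ k < H) := by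
        intro k hk
        have := hch (k + 1) (by simp only [List.length_cons]; omega)
        simp only [List.getElem_cons_succ] at this
        rw [this]
        omega
      have hmain := ih 0 H (by simpa using hH) hch'
      simp only [List.filter_cons, hx, if_pos, List.drop_zero, Nat.sub_zero] at hmain ⊢
      simp [hmain]
    | L + 1, H + 1 =>
      have hx : p x = false := by
        have h0 := hch 0 (by simp)
        simp only [List.getElem_cons_zero] at h0
        rcases Bool.eq_false_or_eq_true (p x) with h | h
        · exact absurd (h0.mp h) (by omega)
        · exact h
      have hch' : ∀ (k : Nat) (hk : k < xs.length), p xs[k] = true ↔ (L ≤ k ∧ k < H) := by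
        intro k hk
        have := hch (k + 1) (by simp only [List.length_cons]; omega)
        simp only [List.getElem_cons_succ] at this
        rw [this]
        omega
      have hmain := ih L H (by simpa using hH) hch'
      simp only [List.filter_cons, hx, List.drop_succ_cons]
      simpa using hmain

theorem pvW_eq_segment (sv : List Int) (md v : Int) (hs : sv.Pairwise (· ≤ ·)) :
    pvW sv md v = (sv.drop (pvL sv md v)).take (pvH sv md v - pvL sv md v) := by
  obtain ⟨hR1, hR2, hR3⟩ := PySem.List.bisectRight_spec sv (v - md) hs
  obtain ⟨hL1, hL2, hL3⟩ := PySem.List.bisectLeft_spec sv (v + md) hs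
  apply filter_eq_drop_take sv _ (pvL sv md v) (pvH sv md v) hL1
  intro k hk
  simp only [decide_eq_true_eq, abs_lt]
  constructor
  · rintro ⟨ha, hb⟩
    constructor
    · by_contra hlt
      push_neg at hlt
      have := hR2 _ hk hlt
      omega
    · by_contra hge
      push_neg at hge
      have := hL3 _ hk hge
      omega
  · rintro ⟨ha, hb⟩
    have h1 := hR3 _ hk ha
    have h2 := hL2 _ hk hb
    omega

theorem pvW_length (sv : List Int) (md v : Int) (hs : sv.Pairwise (· ≤ ·)) (hmd : 0 < md) :
    ((pvW sv md v).length : Int) = pvWlen sv md v := by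
  have hseg := pvW_eq_segment sv md v hs
  have hLH : pvL sv md v ≤ pvH sv md v :=
    bisectRight_le_bisectLeft sv hs (by omega)
  have hHn : pvH sv md v ≤ sv.length := (PySem.List.bisectLeft_spec sv (v + md) hs).1
  rw [hseg]
  simp only [List.length_take, List.length_drop, pvWlen]
  omega

theorem pvH_le_pvL (sv : List Int) (md v : Int) (hs : sv.Pairwise (· ≤ ·)) (hmd : md ≤ 0) :
    pvH sv md v ≤ pvL sv md v :=
  bisectLeft_le_bisectRight sv hs (by omega)

-- head of a stable reverse sort is Python's max (first extremal element)
theorem head?_insertBy_rev {α κ : Type} [LinearOrder κ] (key : α → κ) (x : α) (acc : List α) :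
    (PySem.List.insertBy (fun a b => decide (key b < key a)) x acc).head? =
      (match acc.head? with
       | none => some x
       | some y => if key y < key x then some x else some y) := by
  cases acc with
  | nil => simp [PySem.List.insertBy]
  | cons y ys =>
    by_cases h : key y < key x <;> simp [PySem.List.insertBy, h]

theorem head?_foldl_insertBy {α κ : Type} [LinearOrder κ] (key : α → κ) :
    ∀ (cs : List α) (acc : List α),
    (cs.foldl (fun acc x => PySem.List.insertBy (fun a b => decide (key b < key a)) x acc) acc).head? =
      cs.foldl (fun m x =>
        match m with
        | none => some x
        | some m => if key m < key x then some x else some m) acc.head? := by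
  intro cs
  induction cs with
  | nil => intro acc; rfl
  | cons c cs ih =>
    intro acc
    simp only [List.foldl_cons]
    rw [ih, head?_insertBy_rev]

theorem head_sorted_rev_eq_max {α κ : Type} [LinearOrder κ] (cs : List α) (key : α → κ) :
    (PySem.List.sorted cs key true).head? = PySem.List.max? cs key := by
  rw [PySem.List.sorted_rev_eq_foldl_insertBy, head?_foldl_insertBy]
  rfl

theorem max?_map {α β κ : Type} [LinearOrder κ] (l : List α) (f : α → β) (key : β → κ) :
    PySem.List.max? (l.map f) key = (PySem.List.max? l (fun x => key (f x))).map f := by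
  unfold PySem.List.max?
  rw [List.foldl_map]
  suffices h : ∀ (acc : Option α),
      l.foldl (fun acc x =>
        match acc with
        | none => some (f x)
        | some m => if key m < key (f x) then some (f x) else some m) (acc.map f) =
      (l.foldl (fun acc x =>
        match acc with
        | none => some x
        | some m => if key (f m) < key (f x) then some x else some m) acc).map f by
    simpa using h none
  induction l with
  | nil => intro acc; rfl
  | cons c cs ih =>
    intro acc
    simp only [List.foldl_cons]
    cases acc with
    | none => exact ih (some c)
    | some m =>
      simp only [Option.map_some]
      by_cases h : key (f m) < key (f c)
      · simpa [h] using ih (some c)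
      · simpa [h] using ih (some m)

theorem max?_cons {α κ : Type} [LinearOrder κ] (v : α) (vs : List α) (key : α → κ) :
    PySem.List.max? (v :: vs) key =
      some (vs.foldl (fun m x => if key m < key x then x else m) v) := by
  unfold PySem.List.max?
  simp only [List.foldl_cons]
  suffices h : ∀ (m : α),
      vs.foldl (fun acc x =>
        match acc with
        | none => some x
        | some m => if key m < key x then some x else some m) (some m) =
      some (vs.foldl (fun m x => if key m < key x then x else m) m) from h v
  induction vs with
  | nil => intro m; rfl
  | cons c cs ih =>
    intro m
    simp only [List.foldl_cons]
    by_cases h : key m < key c <;> simp [h, ih]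

-- the two-pointer loop computes exactly the abstract best-window fold
theorem loop_best (sv : List Int) (md : Int) (hs : sv.Pairwise (· ≤ ·)) :
    ∀ (rest : List Int) (v0 : Int) (b : Nat × Nat × Int),
    (∀ x ∈ rest, v0 ≤ x) → rest.Pairwise (· ≤ ·) →
    (rest.foldl (pvStepB sv md) (pvL sv md v0, pvH sv md v0, b)).2.2 =
      rest.foldl (pvAbsStep sv md) b := by
  intro rest
  induction rest with
  | nil => intro v0 b _ _; rfl
  | cons x rest ih =>
    intro v0 b hge hpw
    simp only [List.foldl_cons]
    have hlo : pvAdvLo sv (x - md) (pvL sv md v0) = pvL sv md x := by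
      apply pvAdvLo_eq sv _ hs
      exact bisectRight_mono sv hs (by have := hge x (by simp); omega)
    have hhi : pvAdvHi sv (x + md) (pvH sv md v0) = pvH sv md x := by
      apply pvAdvHi_eq sv _ hs
      exact bisectLeft_mono sv hs (by have := hge x (by simp); omega)
    have hstep : pvStepB sv md (pvL sv md v0, pvH sv md v0, b) x =
        (pvL sv md x, pvH sv md x, pvAbsStep sv md b x) := by
      simp only [pvStepB, hlo, hhi, pvAbsStep, pvWlen, gt_iff_lt]
      by_cases h : b.2.2 < (pvH sv md x : Int) - (pvL sv md x : Int) <;> simp [h]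
    rw [hstep]
    exact ih x _ (fun y hy => (List.pairwise_cons.mp hpw).1 y hy)
      (List.pairwise_cons.mp hpw).2

-- abstract fold versus A's running first-max (positive distance)
theorem absFold_eq_aFold (sv : List Int) (md : Int) (hs : sv.Pairwise (· ≤ ·)) (hmd : 0 < md) :
    ∀ (vs : List Int) (m : Int),
    vs.foldl (pvAbsStep sv md) (pvL sv md m, pvH sv md m, pvWlen sv md m) =
      (pvL sv md (vs.foldl (pvAStep sv md) m), pvH sv md (vs.foldl (pvAStep sv md) m),
        pvWlen sv md (vs.foldl (pvAStep sv md) m)) := by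
  intro vs
  induction vs with
  | nil => intro m; rfl
  | cons x vs ih =>
    intro m
    simp only [List.foldl_cons]
    have hcond : (pvWlen sv md m < pvWlen sv md x) ↔
        ((pvW sv md m).length < (pvW sv md x).length) := by
      rw [← pvW_length sv md m hs hmd, ← pvW_length sv md x hs hmd]
      omega
    by_cases h : (pvW sv md m).length < (pvW sv md x).length
    · have hst : pvAbsStep sv md (pvL sv md m, pvH sv md m, pvWlen sv md m) x =
          (pvL sv md x, pvH sv md x, pvWlen sv md x) := by
        simp [pvAbsStep, hcond.mpr h]
      rw [hst]
      simpa [pvAStep, h] using ih x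
    · have hst : pvAbsStep sv md (pvL sv md m, pvH sv md m, pvWlen sv md m) x =
          (pvL sv md m, pvH sv md m, pvWlen sv md m) := by
        simp only [pvAbsStep, ite_eq_right_iff]
        intro hc
        exact absurd (hcond.mp hc) h
      rw [hst]
      simpa [pvAStep, h] using ih m
-- with md ≤ 0 every window is empty: the best slice bounds stay collapsed
theorem absFold_collapsed (sv : List Int) (md : Int) (hs : sv.Pairwise (· ≤ ·)) (hmd : md ≤ 0) :
    ∀ (vs : List Int) (b : Nat × Nat × Int), b.2.1 ≤ b.1 →
    (vs.foldl (pvAbsStep sv md) b).2.1 ≤ (vs.foldl (pvAbsStep sv md) b).1 := by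
  intro vs
  induction vs with
  | nil => intro b hb; exact hb
  | cons x vs ih =>
    intro b hb
    simp only [List.foldl_cons]
    apply ih
    by_cases h : b.2.2 < pvWlen sv md x
    · simp only [pvAbsStep, h, if_pos]
      exact pvH_le_pvL sv md x hs hmd
    · simp only [pvAbsStep]
      rw [if_neg h]
      exact hb

-- every cluster is empty when md ≤ 0
theorem pvW_empty (sv : List Int) (md v : Int) (hmd : md ≤ 0) : pvW sv md v = [] := by
  rw [pvW, List.filter_eq_nil_iff]
  intro a _
  intro hcon
  have h' := of_decide_eq_true hcon
  have := abs_nonneg (a - v)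
  omega

theorem pyGet?_cons_zero {α : Type} (c : α) (t : List α) :
    PySem.List.pyGet? (c :: t) 0 = some c := by
  simp [PySem.List.pyGet?, PySem.List.pyIdx?]

-- ===== VERDICT (by name: the statement is the Claim_ definition above) =====
theorem one_dimension_val_clutering_spec : Claim_equal_one_dimension_val_clutering := by
  intro vals md _ hpre
  unfold Spec_one_dimension_val_clutering one_dimension_val_clutering one_dimension_val_clutering_alt
  simp only []
  have hs : (PySem.List.sorted vals (fun x => x) false).Pairwise (· ≤ ·) :=
    PySem.List.sorted_pairwise vals (fun x => x)
  have hne : PySem.List.sorted vals (fun x => x) false ≠ [] := fun h =>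
    hpre (by rwa [PySem.List.sorted_eq_nil_iff] at h)
  generalize hgen : PySem.List.sorted vals (fun x => x) false = sv
  rw [hgen] at hs hne
  obtain ⟨v, vs, rfl⟩ : ∃ v vs, sv = v :: vs := by
    cases h : sv with
    | nil => exact absurd h hne
    | cons a l => exact ⟨a, l, rfl⟩
  have hclusters : (PySem.List.enumerate (v :: vs) 0).foldl
      (fun acc p => acc ++ [(v :: vs).filter (fun j => decide (|j - p.2| < md))]) [] =
      (v :: vs).map (pvW (v :: vs) md) := by
    rw [PySem.List.foldl_append_singleton_eq_map]
    have h2 : (PySem.List.enumerate (v :: vs) 0).map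
          (fun p => (v :: vs).filter (fun j => decide (|j - p.2| < md)))
        = ((PySem.List.enumerate (v :: vs) 0).map (·.2)).map (pvW (v :: vs) md) := by
      rw [List.map_map]; rfl
    rw [h2, PySem.List.map_snd_enumerate, List.nil_append]
  have hheadA : (PySem.List.sorted ((v :: vs).map (pvW (v :: vs) md)) (fun c => c.length) true).head? =
      some (pvW (v :: vs) md (vs.foldl (pvAStep (v :: vs) md) v)) := by
    rw [head_sorted_rev_eq_max, max?_map, max?_cons]
    rfl
  have hA : (PySem.List.pyGet? (PySem.List.sorted ((v :: vs).map (pvW (v :: vs) md)) (fun c => c.length) true) 0).getD []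
      = pvW (v :: vs) md (vs.foldl (pvAStep (v :: vs) md) v) := by
    cases hs2 : PySem.List.sorted ((v :: vs).map (pvW (v :: vs) md)) (fun c => c.length) true with
    | nil => rw [hs2] at hheadA; simp at hheadA
    | cons c t =>
      rw [hs2] at hheadA
      simp only [List.head?_cons, Option.some.injEq] at hheadA
      rw [pyGet?_cons_zero, Option.getD_some, hheadA]
  have hfirst : pvStepB (v :: vs) md (0, 0, 0, 0, -1) v =
      (pvL (v :: vs) md v, pvH (v :: vs) md v, pvAbsStep (v :: vs) md (0, 0, -1) v) := by
    have hlo : pvAdvLo (v :: vs) (v - md) 0 = pvL (v :: vs) md v :=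
      pvAdvLo_eq (v :: vs) _ hs 0 (Nat.zero_le _)
    have hhi : pvAdvHi (v :: vs) (v + md) 0 = pvH (v :: vs) md v :=
      pvAdvHi_eq (v :: vs) _ hs 0 (Nat.zero_le _)
    simp only [pvStepB, hlo, hhi, pvAbsStep, pvWlen, gt_iff_lt]
    by_cases h : ((-1 : Int) < (pvH (v :: vs) md v : Int) - (pvL (v :: vs) md v : Int)) <;> simp [h]
  have hvs_ge : ∀ x ∈ vs, v ≤ x := (List.pairwise_cons.mp hs).1
  have hvs_pw : vs.Pairwise (· ≤ ·) := (List.pairwise_cons.mp hs).2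
  have hB : ((v :: vs).foldl (pvStepB (v :: vs) md) (0, 0, 0, 0, -1)).2.2 =
      vs.foldl (pvAbsStep (v :: vs) md) (pvAbsStep (v :: vs) md (0, 0, -1) v) := by
    rw [List.foldl_cons, hfirst]
    exact loop_best (v :: vs) md hs vs v _ hvs_ge hvs_pw
  by_cases hmd : 0 < md
  · -- positive distance: both sides return the same maximal window
    have hWv : pvAbsStep (v :: vs) md (0, 0, -1) v =
        (pvL (v :: vs) md v, pvH (v :: vs) md v, pvWlen (v :: vs) md v) := by
      have hle := bisectRight_le_bisectLeft (v :: vs) hs (show v - md < v + md by omega)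
      have h0 : (-1 : Int) < pvWlen (v :: vs) md v := by
        simp only [pvWlen, pvL, pvH] at *
        omega
      simp [pvAbsStep, h0]
    have hbest : ((v :: vs).foldl (pvStepB (v :: vs) md) (0, 0, 0, 0, -1)).2.2 =
        (pvL (v :: vs) md (vs.foldl (pvAStep (v :: vs) md) v),
         pvH (v :: vs) md (vs.foldl (pvAStep (v :: vs) md) v),
         pvWlen (v :: vs) md (vs.foldl (pvAStep (v :: vs) md) v)) := by
      rw [hB, hWv, absFold_eq_aFold (v :: vs) md hs hmd vs v]
    have hslice : PySem.List.slice (v :: vs)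
        (some ((pvL (v :: vs) md (vs.foldl (pvAStep (v :: vs) md) v) : Nat) : Int))
        (some ((pvH (v :: vs) md (vs.foldl (pvAStep (v :: vs) md) v) : Nat) : Int))
        = pvW (v :: vs) md (vs.foldl (pvAStep (v :: vs) md) v) := by
      rw [PySem.List.slice_natCast]
      exact (pvW_eq_segment (v :: vs) md (vs.foldl (pvAStep (v :: vs) md) v) hs).symm
    rw [hclusters, hA, hbest]
    simp only []
    rw [hslice]
  · -- md ≤ 0: every cluster is empty, both sides return []
    push_neg at hmd
    have hAe : pvW (v :: vs) md (vs.foldl (pvAStep (v :: vs) md) v) = [] :=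
      pvW_empty (v :: vs) md _ hmd
    have hb0 : (pvAbsStep (v :: vs) md (0, 0, -1) v).2.1 ≤ (pvAbsStep (v :: vs) md (0, 0, -1) v).1 := by
      by_cases h : ((0 : Nat), (0 : Nat), (-1 : Int)).2.2 < pvWlen (v :: vs) md v
      · simp only [pvAbsStep, h, if_pos]
        exact pvH_le_pvL (v :: vs) md v hs hmd
      · simp only [pvAbsStep]
        rw [if_neg h]
    have hcoll := absFold_collapsed (v :: vs) md hs hmd vs _ hb0
    have hBe : PySem.List.slice (v :: vs)
        (some ((((v :: vs).foldl (pvStepB (v :: vs) md) (0, 0, 0, 0, -1)).2.2.1 : Nat) : Int))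
        (some ((((v :: vs).foldl (pvStepB (v :: vs) md) (0, 0, 0, 0, -1)).2.2.2.1 : Nat) : Int)) = [] := by
      rw [show ((v :: vs).foldl (pvStepB (v :: vs) md) (0, 0, 0, 0, -1)).2.2.1 =
            (((v :: vs).foldl (pvStepB (v :: vs) md) (0, 0, 0, 0, -1)).2.2).1 from rfl,
          show ((v :: vs).foldl (pvStepB (v :: vs) md) (0, 0, 0, 0, -1)).2.2.2.1 =
            (((v :: vs).foldl (pvStepB (v :: vs) md) (0, 0, 0, 0, -1)).2.2).2.1 from rfl,
          hB, PySem.List.slice_natCast]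
      rw [Nat.sub_eq_zero_of_le hcoll, List.take_zero]
    rw [hclusters, hA, hAe, hBe]
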